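-- pv_equiv track=rewrite | github.com/JBRS307/WDI | list1/zad7.py | fibAndTest
-- ===== SOURCE A (Python) =====
-- def fibAndTest(test):
--     if test == 1:
--         return True
--     n1 = 1
--     n2 = 1
--     while n1+n2 <= test:
--         if n2*(n1+n2) == test:
--             return True
--         n1, n2 = n2, n1+n2
--     return False
-- ===== SOURCE B (Python) =====
-- def fibAndTest(test):
--     a, b, s = 1, 1, 0
--     while a <= test:
--         s += a * a
--         if s == test:
--             return True
--         a, b = b, a + b
--     return False
-- ===== Notes on version B (the rewrite author's own statement) =====
-- stated objective: alternative
-- what changed: B replaces A's direct product test n2*(n1+n2)==test (plus the special-cased test==1) with a running sum of Fibonacci squares (identity sum F_i^2 = F_k*F_{k+1}), checked under the guard a<=test with no special case.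
import Mathlib
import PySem

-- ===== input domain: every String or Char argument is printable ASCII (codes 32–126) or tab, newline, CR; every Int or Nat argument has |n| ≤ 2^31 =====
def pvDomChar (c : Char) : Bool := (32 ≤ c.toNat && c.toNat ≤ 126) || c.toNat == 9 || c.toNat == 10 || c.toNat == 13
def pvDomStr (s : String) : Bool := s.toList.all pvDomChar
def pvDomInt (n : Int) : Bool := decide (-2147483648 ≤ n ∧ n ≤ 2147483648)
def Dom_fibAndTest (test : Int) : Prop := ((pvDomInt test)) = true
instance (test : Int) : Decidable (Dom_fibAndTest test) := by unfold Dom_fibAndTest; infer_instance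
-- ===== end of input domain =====

-- B checks products via a running sum of Fibonacci squares instead of A's direct product; same cost (alternative decomposition).

-- ===== PORT A =====
-- while n1+n2 <= test: if n2*(n1+n2)==test: return True; n1,n2 = n2,n1+n2  (positivity proofs carried for termination)
def fibLoopA (test n1 n2 : Int) (h1 : 0 < n1) (h2 : 0 < n2) : Bool :=
  if h : n1 + n2 ≤ test then
    if n2 * (n1 + n2) == test then true
    else fibLoopA test n2 (n1 + n2) h2 (by omega)
  else false
termination_by (test + 1 - (n1 + n2)).toNat
decreasing_by omega

def fibAndTest (test : Int) : Bool :=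
  if test == 1 then true
  else fibLoopA test 1 1 (by norm_num) (by norm_num)

-- ===== PORT B =====
-- while a <= test: s += a*a; if s == test: return True; a,b = b,a+b  (invariant proofs carried for termination)
def fibLoopB (test a b s : Int) (ha : 0 < a) (hab : a ≤ b) : Bool :=
  if h : a ≤ test then
    if s + a * a == test then true
    else fibLoopB test b (a + b) (s + a * a) (by omega) (by omega)
  else false
termination_by ((test + 1 - a).toNat, (test + 1 - b).toNat)
decreasing_by
  by_cases hlt : a < b
  · exact Prod.Lex.left _ _ (by omega)
  · have hab' : a = b := by omega
    subst hab'
    exact Prod.Lex.right _ (by omega)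

def fibAndTest_alt (test : Int) : Bool :=
  fibLoopB test 1 1 0 (by norm_num) (by norm_num)

-- ===== PRECONDITION & SPEC =====
def Spec_fibAndTest (test : Int) (out : Bool) : Prop := out = fibAndTest_alt test
instance (test : Int) (out : Bool) : Decidable (Spec_fibAndTest test out) := by unfold Spec_fibAndTest; infer_instance

-- ===== CLAIM (what is proved, stated in full; the proofs are below) =====
def Claim_equal_fibAndTest : Prop := ∀ (test : Int), Dom_fibAndTest test → Spec_fibAndTest test (fibAndTest test)

-- ===== LEMMAS AND PROOFS =====

-- One unfolding step of each loop (the equation lemmas, stated for rewriting).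
theorem fibLoopA_eq (test n1 n2 : Int) (h1 : 0 < n1) (h2 : 0 < n2) :
    fibLoopA test n1 n2 h1 h2 =
      if n1 + n2 ≤ test then
        if n2 * (n1 + n2) == test then true
        else fibLoopA test n2 (n1 + n2) h2 (by omega)
      else false := by
  rw [fibLoopA]
  split <;> simp

theorem fibLoopB_eq (test a b s : Int) (ha : 0 < a) (hab : a ≤ b) :
    fibLoopB test a b s ha hab =
      if a ≤ test then
        if s + a * a == test then true
        else fibLoopB test b (a + b) (s + a * a) (by omega) (by omega)
      else false := by
  rw [fibLoopB]
  split <;> simp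

-- Main correspondence: A's loop at (n1,n2) equals B's loop at (a,b,s) = (n2, n1+n2, n1*n2).
theorem loop_corr (test n1 n2 : Int) (h1 : 0 < n1) (h2 : 0 < n2) (h12 : n1 ≤ n2) :
    fibLoopA test n1 n2 h1 h2 =
      fibLoopB test n2 (n1 + n2) (n1 * n2) (by omega) (by omega) := by
  rw [fibLoopA_eq, fibLoopB_eq]
  have hs : n1 * n2 + n2 * n2 = n2 * (n1 + n2) := by ring
  by_cases hg : n1 + n2 ≤ test
  · -- A's guard holds, hence B's guard n2 ≤ test holds too
    have hg2 : n2 ≤ test := by omega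
    rw [if_pos hg, if_pos hg2, hs]
    by_cases heq : n2 * (n1 + n2) = test
    · simp [heq]
    · rw [if_neg (by simpa using heq), if_neg (by simpa using heq)]
      have := loop_corr test n2 (n1 + n2) h2 (by omega) (by omega)
      rw [this]
  · rw [if_neg hg]
    by_cases hg2 : n2 ≤ test
    · -- B checks a product that exceeds test, then its guard fails on the next step
      rw [if_pos hg2, hs]
      have hbig : n2 * (n1 + n2) ≠ test := by nlinarith
      rw [if_neg (by simpa using hbig), fibLoopB_eq, if_neg (by omega)]
    · rw [if_neg hg2]
termination_by (test + 1 - (n1 + n2)).toNat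
decreasing_by omega

theorem main_eq (test : Int) : fibAndTest test = fibAndTest_alt test := by
  unfold fibAndTest fibAndTest_alt
  rw [fibLoopB_eq]
  by_cases h1 : (1 : Int) ≤ test
  · rw [if_pos h1]
    by_cases ht : test = 1
    · simp [ht]
    · rw [if_neg (by simpa using ht), if_neg (by simp; omega)]
      have := loop_corr test 1 1 (by norm_num) (by norm_num) (by norm_num)
      rw [this]
      norm_num
  · -- test < 1: A's special case does not fire and both loops return false at once
    rw [if_neg h1, if_neg (by simp; omega), fibLoopA_eq, if_neg (by omega)]

-- ===== VERDICT (by name: the statement is the Claim_ definition above) =====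
theorem fibAndTest_spec : Claim_equal_fibAndTest := by
  intro test _
  unfold Spec_fibAndTest
  exact main_eq test
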